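-- pv_equiv track=rewrite | github.com/bibleman-stan/readers-gnt | scripts/bezae_compare.py | get_break_positions
-- ===== SOURCE A (Python) =====
-- def get_break_positions(lines):
--     """Given a list of lines (each a list of words), return the set of
--     word positions where breaks occur.
--
--     A break occurs after word position N (0-indexed cumulative) if there's
--     a line boundary there. We return the set of positions after which breaks occur.
--     """
--     positions = set()
--     cumulative = 0
--     for i, line_words in enumerate(lines):
--         if i > 0:
--             positions.add(cumulative)  # break before this line = after position cumulative
--         cumulative += len(line_words)
--     return positions, cumulative
-- ===== SOURCE B (Python) =====
-- def get_break_positions(lines):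
--     """Structural right fold: the break set of `lines` is the break set of its
--     tail shifted by the head line's length, plus a break at that length when a
--     tail exists; the fold is run iteratively over reversed(lines)."""
--     positions, total = set(), 0
--     started = False
--     for line_words in reversed(lines):
--         h = len(line_words)
--         shifted = {h + q for q in positions}
--         positions = ({h} | shifted) if started else shifted
--         total = h + total
--         started = True
--     return positions, total
-- ===== Notes on version B (the rewrite author's own statement) =====
-- stated objective: alternative
-- what changed: B computes the break set by a structural right fold over reversed(lines) — the tail's break set is shifted by the head line's length and the head boundary is unioned in — instead of A's forward scan with a running cumulative counter and enumerate index guard.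
import Mathlib
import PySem

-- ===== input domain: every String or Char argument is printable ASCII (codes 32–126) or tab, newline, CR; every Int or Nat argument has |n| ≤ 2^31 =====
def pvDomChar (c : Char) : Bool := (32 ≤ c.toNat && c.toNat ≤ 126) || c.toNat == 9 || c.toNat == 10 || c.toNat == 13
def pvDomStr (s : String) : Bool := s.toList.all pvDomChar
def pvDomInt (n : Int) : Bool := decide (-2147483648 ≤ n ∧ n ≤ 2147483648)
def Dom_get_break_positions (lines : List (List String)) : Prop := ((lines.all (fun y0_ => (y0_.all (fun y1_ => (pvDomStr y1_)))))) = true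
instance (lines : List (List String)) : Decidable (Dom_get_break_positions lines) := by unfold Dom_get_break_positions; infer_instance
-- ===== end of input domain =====

-- B replaces A's forward accumulating scan by a structural right fold over reversed(lines):
-- the break set of the tail is shifted by the head's length and the head boundary is added.
-- Same return value; objective: alternative (different traversal and maintained state).

-- ===== PORT A =====
-- the 'for i, line_words in enumerate(lines)' loop, state (positions, cumulative), index i
def pvLoopA : Int → PySem.Set Int → Int → List (List String) → PySem.Set Int × Int
  | _, positions, cumulative, [] => (positions, cumulative)
  | i, positions, cumulative, line_words :: rest =>
      let positions' := if i > 0 then PySem.Set.add positions cumulative else positions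
      pvLoopA (i + 1) positions' (cumulative + (line_words.length : Int)) rest

def get_break_positions (lines : List (List String)) : List Int × Int :=
  pvLoopA 0 PySem.Set.empty 0 lines

-- ===== PORT B =====
-- one step of the 'for line_words in reversed(lines)' loop, state (positions, total, started)
def pvStepB (st : PySem.Set Int × Int × Bool) (line_words : List String) : PySem.Set Int × Int × Bool :=
  let h : Int := line_words.length
  -- {h + q for q in positions}: a set built from a set by an injective shift — result is order-independent
  let shifted : PySem.Set Int := PySem.Set.ofList (st.1.map (fun q => h + q))
  let positions := if st.2.2 then PySem.Set.union (PySem.Set.ofList [h]) shifted else shifted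
  (positions, h + st.2.1, true)

def get_break_positions_alt (lines : List (List String)) : List Int × Int :=
  let st := lines.reverse.foldl pvStepB (PySem.Set.empty, 0, false)
  (st.1, st.2.1)

-- ===== PRECONDITION & SPEC =====
def Spec_get_break_positions (lines : List (List String)) (out : List Int × Int) : Prop := out = get_break_positions_alt lines
instance (lines : List (List String)) (out : List Int × Int) : Decidable (Spec_get_break_positions lines out) := by unfold Spec_get_break_positions; infer_instance

-- ===== CLAIM (what is proved, stated in full; the proofs are below) =====
def Claim_equal_get_break_positions : Prop := ∀ (lines : List (List String)), Dom_get_break_positions lines → Spec_get_break_positions lines (get_break_positions lines)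

-- ===== LEMMAS AND PROOFS =====

-- reference prefix-sum list used only by the proofs
def pvTotals : Int → List (List String) → List Int
  | _, [] => []
  | t, l :: rest => (t + (l.length : Int)) :: pvTotals (t + (l.length : Int)) rest

lemma pvTotals_ne_nil (t : Int) (l : List String) (rest : List (List String)) :
    pvTotals t (l :: rest) ≠ [] := by simp [pvTotals]

lemma pvTotals_shift : ∀ (s : List (List String)) (a t : Int),
    pvTotals (a + t) s = (pvTotals t s).map (fun x => a + x) := by
  intro s
  induction s with
  | nil => intro a t; simp [pvTotals]
  | cons l rest ih =>
      intro a t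
      simp only [pvTotals, List.map_cons, add_assoc, List.cons.injEq]
      exact ⟨trivial, ih a (t + (l.length : Int))⟩

lemma getLastD_cons (a d : Int) (xs : List Int) :
    ((a :: xs).getLast?.getD d) = xs.getLast?.getD a := by
  cases xs with
  | nil => simp
  | cons b ys =>
      cases h : (b :: ys).getLast? with
      | none => simp at h
      | some x => simp [List.getLast?_cons_cons, h]

lemma pvLoopA_eq : ∀ (lines : List (List String)) (i : Int) (pos : PySem.Set Int) (cum : Int),
    0 < i →
    pvLoopA i pos cum lines =
      ((cum :: pvTotals cum lines).dropLast.foldl PySem.Set.add pos,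
       (pvTotals cum lines).getLast?.getD cum) := by
  intro lines
  induction lines with
  | nil => intro i pos cum hi; simp [pvLoopA, pvTotals]
  | cons l rest ih =>
      intro i pos cum hi
      have hi' : (0 : Int) < i + 1 := by omega
      simp only [pvLoopA, if_pos hi]
      rw [ih _ _ _ hi']
      simp only [Prod.mk.injEq]
      refine ⟨?_, ?_⟩
      · cases h : pvTotals (cum + (l.length : Int)) rest with
        | nil => simp [pvTotals, h]
        | cons a ys => simp [pvTotals, h]
      · simp [pvTotals, getLastD_cons]

-- characterisation of A's result
lemma pvA_char (lines : List (List String)) :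
    get_break_positions lines =
      (PySem.Set.ofList (pvTotals 0 lines).dropLast, (pvTotals 0 lines).getLast?.getD 0) := by
  unfold get_break_positions
  cases lines with
  | nil => simp [pvLoopA, pvTotals]
  | cons l rest =>
      have h0 : ¬ ((0:Int) > 0) := by omega
      simp only [pvLoopA, h0, if_false, zero_add]
      rw [pvLoopA_eq rest 1 PySem.Set.empty ((l.length : Int)) (by omega)]
      simp [pvTotals, PySem.Set.ofList_eq_foldl, getLastD_cons]

-- the injective shift commutes with discard and with set(…)
lemma pvMap_discard (h x : Int) (s : List Int) :
    (PySem.Set.discard s x).map (fun q => h + q)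
      = PySem.Set.discard (s.map (fun q => h + q)) (h + x) := by
  induction s with
  | nil => simp [PySem.Set.discard]
  | cons a s ih =>
      simp only [PySem.Set.discard, List.filter_cons, List.map_cons] at *
      by_cases hax : a = x
      · simp [hax, ih]
      · have : ¬ (h + a = h + x) := by omega
        simp [hax, this, ih]

lemma pvMap_ofList (h : Int) : ∀ (R : List Int),
    (PySem.Set.ofList R).map (fun q => h + q) = PySem.Set.ofList (R.map (fun q => h + q)) := by
  intro R
  induction R with
  | nil => simp [PySem.Set.ofList_nil]
  | cons a R ih =>
      rw [PySem.Set.ofList_cons, List.map_cons, List.map_cons, PySem.Set.ofList_cons,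
        pvMap_discard, ih]

-- set union with the singleton {h}, on a duplicate-free right argument
lemma pvUnion_single (h : Int) (S : PySem.Set Int) (hS : S.Nodup) :
    PySem.Set.union (PySem.Set.ofList [h]) S = h :: PySem.Set.discard S h := by
  have h1 : PySem.Set.ofList [h] = [h] := by
    simp [PySem.Set.ofList, PySem.Set.add, PySem.Set.empty]
  rw [h1]
  show PySem.Set.update [h] S = _
  rw [PySem.Set.update_eq_append_filter]
  rw [PySem.Set.ofList_eq_self_of_nodup S hS]
  simp only [List.singleton_append, List.cons.injEq, true_and, PySem.Set.discard]
  apply List.filter_congr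
  intro x _
  simp only [PySem.Set.contains]
  by_cases hx : x = h <;> simp [hx]

-- invariant of B's loop over reversed(lines)
lemma pvB_loop : ∀ (s : List (List String)),
    s.reverse.foldl pvStepB (PySem.Set.empty, 0, false)
      = (PySem.Set.ofList (pvTotals 0 s).dropLast,
         (pvTotals 0 s).getLast?.getD 0,
         !s.isEmpty) := by
  intro s
  induction s with
  | nil => simp [pvTotals, PySem.Set.ofList_nil, PySem.Set.empty]
  | cons l rest ih =>
      rw [List.reverse_cons, List.foldl_append, ih]
      cases rest with
      | nil =>
          simp [pvStepB, pvTotals, PySem.Set.ofList_nil]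
      | cons r rs =>
          have hh : ((0:Int) + (l.length : Int)) = ((l.length : Int) + 0) := by omega
          have hR : (pvTotals 0 (l :: r :: rs)).dropLast
              = ((l.length : Int) + 0) ::
                  ((pvTotals 0 (r :: rs)).dropLast.map (fun x => (l.length : Int) + x)) := by
            show ((0 + (l.length : Int)) :: pvTotals (0 + (l.length : Int)) (r :: rs)).dropLast = _
            rw [List.dropLast_cons_of_ne_nil (pvTotals_ne_nil _ r rs), hh,
              pvTotals_shift (r :: rs) ((l.length : Int)) 0, List.map_dropLast]
          have hTot : (pvTotals 0 (l :: r :: rs)).getLast?.getD 0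
              = (l.length : Int) + (pvTotals 0 (r :: rs)).getLast?.getD 0 := by
            show (((0:Int) + (l.length : Int)) :: pvTotals (0 + (l.length : Int)) (r :: rs)).getLast?.getD 0 = _
            rw [getLastD_cons, hh, pvTotals_shift (r :: rs) ((l.length : Int)) 0,
              List.getLast?_map]
            cases (pvTotals 0 (r :: rs)).getLast? with
            | none => simp
            | some x => simp
          simp only [pvStepB, List.isEmpty_cons, Bool.not_false, if_true, List.foldl_cons,
            List.foldl_nil]
          rw [pvMap_ofList, PySem.Set.ofList_ofList,
            pvUnion_single _ _ (PySem.Set.nodup_ofList _), hR, hTot, PySem.Set.ofList_cons]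
          simp

-- ===== VERDICT (by name: the statement is the Claim_ definition above) =====
theorem get_break_positions_spec : Claim_equal_get_break_positions := by
  intro lines _
  unfold Spec_get_break_positions get_break_positions_alt
  rw [pvB_loop, pvA_char]
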